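-- pv_equiv track=rewrite | github.com/Cansucansu3/ReBloom | ai_service/services/visual_search_service.py | infer_candidate_category
-- ===== SOURCE A (Python) =====
-- CATEGORY_ALIASES = {
--     "top": "tops",
--     "shirt": "tops",
--     "shirts": "tops",
--     "tshirt": "tops",
--     "tshirts": "tops",
--     "t-shirt": "tops",
--     "t-shirts": "tops",
--     "sweater": "tops",
--     "sweatshirt": "tops",
--     "jacket": "tops",
--     "jean": "pants",
--     "jeans": "pants",
--     "trouser": "pants",
--     "trousers": "pants",
--     "short": "shorts",
--     "shorts": "shorts",
--     "track pants": "pants",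
--     "skirt": "skirts",
--     "skirts": "skirts",
--     "dress": "dresses",
--     "dresses": "dresses",
--     "shoe": "shoes",
--     "shoes": "shoes",
--     "heels": "shoes",
--     "flats": "shoes",
--     "sandals": "shoes",
--     "flip flops": "shoes",
--     "bag": "bags",
--     "bags": "bags",
--     "handbag": "bags",
--     "handbags": "bags",
--     "backpack": "bags",
-- }
--
-- def normalize_category(value):
--     normalized = str(value or "").strip().lower()
--     return CATEGORY_ALIASES.get(normalized, normalized)
--
-- def category_from_text(value):
--     text = str(value or "").strip().lower()
--     if not text:
--         return None
--
--     aliases = sorted(CATEGORY_ALIASES.items(), key=lambda item: len(item[0]), reverse=True)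
--     for alias, category in aliases:
--         if alias in text:
--             return category
--
--     return None
--
-- def infer_candidate_category(candidate):
--     values = [
--         candidate.get("subcategory"),
--         candidate.get("title"),
--         candidate.get("category"),
--     ]
--
--     for value in values:
--         category = category_from_text(value)
--         if category:
--             return category
--
--     return normalize_category(candidate.get("category"))
-- ===== SOURCE B (Python) =====
-- CATEGORY_ALIASES = {
--     "top": "tops",
--     "shirt": "tops",
--     "shirts": "tops",
--     "tshirt": "tops",
--     "tshirts": "tops",
--     "t-shirt": "tops",
--     "t-shirts": "tops",
--     "sweater": "tops",
--     "sweatshirt": "tops",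
--     "jacket": "tops",
--     "jean": "pants",
--     "jeans": "pants",
--     "trouser": "pants",
--     "trousers": "pants",
--     "short": "shorts",
--     "shorts": "shorts",
--     "track pants": "pants",
--     "skirt": "skirts",
--     "skirts": "skirts",
--     "dress": "dresses",
--     "dresses": "dresses",
--     "shoe": "shoes",
--     "shoes": "shoes",
--     "heels": "shoes",
--     "flats": "shoes",
--     "sandals": "shoes",
--     "flip flops": "shoes",
--     "bag": "bags",
--     "bags": "bags",
--     "handbag": "bags",
--     "handbags": "bags",
--     "backpack": "bags",
-- }
--
--
-- def infer_candidate_category(candidate):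
--     # Single pass per field: scan the alias table once, keeping the longest
--     # matching alias (strict '>' keeps the first-inserted alias on length ties),
--     # instead of sorting the table by length and taking the first hit.
--     for key in ("subcategory", "title", "category"):
--         text = str(candidate.get(key) or "").strip().lower()
--         best_len = 0
--         best_cat = None
--         for alias, category in CATEGORY_ALIASES.items():
--             if len(alias) > best_len and alias in text:
--                 best_len = len(alias)
--                 best_cat = category
--         if best_cat:
--             return best_cat
--     value = str(candidate.get("category") or "").strip().lower()
--     return CATEGORY_ALIASES.get(value, value)
-- ===== Notes on version B (the rewrite author's own statement) =====
-- stated objective: alternative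
-- what changed: category_from_text's sort-the-alias-table-by-length-then-return-first-substring-hit is replaced by a single unsorted pass over CATEGORY_ALIASES that keeps the longest matching alias (strict '>' preserves the insertion-order tie-break), with the empty-text guard dropped as redundant and normalize_category inlined as the fallback.
import Mathlib
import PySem

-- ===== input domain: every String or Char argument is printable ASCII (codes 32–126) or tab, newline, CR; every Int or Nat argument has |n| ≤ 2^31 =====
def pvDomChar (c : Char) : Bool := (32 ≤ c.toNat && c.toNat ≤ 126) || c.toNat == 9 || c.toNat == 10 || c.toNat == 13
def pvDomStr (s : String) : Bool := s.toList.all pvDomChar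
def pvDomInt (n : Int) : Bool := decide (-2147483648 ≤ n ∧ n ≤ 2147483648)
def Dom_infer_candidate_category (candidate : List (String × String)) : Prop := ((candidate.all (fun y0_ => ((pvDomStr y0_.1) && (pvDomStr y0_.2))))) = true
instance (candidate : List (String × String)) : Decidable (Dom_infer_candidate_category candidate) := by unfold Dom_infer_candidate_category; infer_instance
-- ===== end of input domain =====

-- B replaces A's per-call sort-by-length-then-first-hit alias scan by a single
-- scan-and-keep-longest pass over the alias table (same result; different decomposition).

-- the shared module constant CATEGORY_ALIASES (used by both Pythons), as its item list
def CATEGORY_ALIASES : List (String × String) := [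
  ("top", "tops"), ("shirt", "tops"), ("shirts", "tops"), ("tshirt", "tops"),
  ("tshirts", "tops"), ("t-shirt", "tops"), ("t-shirts", "tops"), ("sweater", "tops"),
  ("sweatshirt", "tops"), ("jacket", "tops"), ("jean", "pants"), ("jeans", "pants"),
  ("trouser", "pants"), ("trousers", "pants"), ("short", "shorts"), ("shorts", "shorts"),
  ("track pants", "pants"), ("skirt", "skirts"), ("skirts", "skirts"), ("dress", "dresses"),
  ("dresses", "dresses"), ("shoe", "shoes"), ("shoes", "shoes"), ("heels", "shoes"),
  ("flats", "shoes"), ("sandals", "shoes"), ("flip flops", "shoes"), ("bag", "bags"),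
  ("bags", "bags"), ("handbag", "bags"), ("handbags", "bags"), ("backpack", "bags")]

-- ===== PORT A =====

-- normalize_category(value)  (value : candidate.get(...) result, i.e. Option String;
-- 'str(value or "")' on an Option String is '(value).getD ""' since str is identity on str)
def normalize_category (value : Option String) : String :=
  let normalized := PySem.Str.lower (PySem.Str.strip (value.getD ""))
  PySem.Dict.getD (PySem.Dict.mk CATEGORY_ALIASES) normalized normalized

-- the 'for alias, category in aliases: if alias in text: return category' loop
def firstAliasMatch : List (String × String) → String → Option String
  | [], _ => none
  | (alias_, category) :: rest, text =>
      if PySem.Str.isIn alias_ text then some category else firstAliasMatch rest text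

-- category_from_text(value)
def category_from_text (value : Option String) : Option String :=
  let text := PySem.Str.lower (PySem.Str.strip (value.getD ""))
  if text = "" then none
  else
    let aliases := PySem.List.sorted (PySem.Dict.items (PySem.Dict.mk CATEGORY_ALIASES))
        (fun item => PySem.Str.len item.1) true
    firstAliasMatch aliases text

-- the 'for value in values: category = category_from_text(value); if category: return category' loop
def loopValuesA : List (Option String) → Option String
  | [] => none
  | v :: rest =>
      match category_from_text v with
      | some c => if c = "" then loopValuesA rest else some c   -- 'if category:' (falsy: None and "")
      | none => loopValuesA rest

def infer_candidate_category (candidate : List (String × String)) : String :=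
  let d := PySem.Dict.mk candidate
  let values := [PySem.Dict.get? d "subcategory", PySem.Dict.get? d "title", PySem.Dict.get? d "category"]
  match loopValuesA values with
  | some c => c
  | none => normalize_category (PySem.Dict.get? d "category")

-- ===== PORT B =====

-- B's inner loop: keep the longest matching alias (strict '>': first-inserted wins ties)
def bestScan (text : String) : List (String × String) → Int × Option String → Int × Option String
  | [], st => st
  | (alias_, category) :: rest, st =>
      bestScan text rest
        (if PySem.Str.len alias_ > st.1 && PySem.Str.isIn alias_ text then (PySem.Str.len alias_, some category) else st)

-- one field: normalise the field's text, then run the single scan over the alias table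
def scanField (d : PySem.Dict String String) (k : String) : Option String :=
  let text := PySem.Str.lower (PySem.Str.strip ((PySem.Dict.get? d k).getD ""))
  (bestScan text CATEGORY_ALIASES (0, none)).2

-- 'if best_cat: return best_cat' (falsy: None and ""), else continue with the next field
def stepB (best : Option String) (next : String) : String :=
  match best with
  | some c => if c = "" then next else c
  | none => next

-- the final fallback 'CATEGORY_ALIASES.get(value, value)' on the normalised category field
def fallbackB (d : PySem.Dict String String) : String :=
  let value := PySem.Str.lower (PySem.Str.strip ((PySem.Dict.get? d "category").getD ""))
  PySem.Dict.getD (PySem.Dict.mk CATEGORY_ALIASES) value value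

-- B's outer loop over the three field names
def loopKeysB : PySem.Dict String String → List String → String
  | d, [] => fallbackB d
  | d, k :: rest => stepB (scanField d k) (loopKeysB d rest)

def infer_candidate_category_alt (candidate : List (String × String)) : String :=
  loopKeysB (PySem.Dict.mk candidate) ["subcategory", "title", "category"]

-- ===== PRECONDITION & SPEC =====
def Spec_infer_candidate_category (candidate : List (String × String)) (out : String) : Prop := out = infer_candidate_category_alt candidate
instance (candidate : List (String × String)) (out : String) : Decidable (Spec_infer_candidate_category candidate out) := by unfold Spec_infer_candidate_category; infer_instance

-- ===== CLAIM (what is proved, stated in full; the proofs are below) =====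
def Claim_equal_infer_candidate_category : Prop := ∀ (candidate : List (String × String)), Dom_infer_candidate_category candidate → Spec_infer_candidate_category candidate (infer_candidate_category candidate)

-- ===== LEMMAS AND PROOFS =====

-- proof-side restructuring of bestScan: return the winning PAIR (or none)
def pickRec (text : String) : List (String × String) → Int → Option (String × String)
  | [], _ => none
  | p :: t, k =>
      if PySem.Str.len p.1 > k && PySem.Str.isIn p.1 text then
        some ((pickRec text t (PySem.Str.len p.1)).getD p)
      else pickRec text t k

theorem bestScan_eq_pickRec (text : String) (l : List (String × String)) (k : Int) (c : Option String) :
    (bestScan text l (k, c)).2 = match pickRec text l k with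
      | some p => some p.2
      | none => c := by
  induction l generalizing k c with
  | nil => rfl
  | cons p t ih =>
    obtain ⟨a, cat⟩ := p
    simp only [bestScan, pickRec]
    by_cases h : (PySem.Str.len a > k && PySem.Str.isIn a text) = true
    · simp only [h, if_pos]
      rw [ih]
      cases hp : pickRec text t (PySem.Str.len a) <;> simp
    · simp only [h]
      rw [if_neg (by simp), if_neg (by simp), ih]

theorem pickRec_none (text : String) (l : List (String × String)) (k : Int)
    (h : pickRec text l k = none) :
    ∀ q ∈ l, PySem.Str.isIn q.1 text = true → PySem.Str.len q.1 ≤ k := by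
  induction l generalizing k with
  | nil => intro q hq; simp at hq
  | cons p t ih =>
    intro q hq hm
    simp only [pickRec] at h
    by_cases hc : (PySem.Str.len p.1 > k && PySem.Str.isIn p.1 text) = true
    · rw [if_pos hc] at h
      cases hp : pickRec text t (PySem.Str.len p.1) <;> simp at h
    · rw [if_neg hc] at h
      rcases List.mem_cons.mp hq with rfl | hq'
      · simp only [Bool.and_eq_true, not_and, Bool.not_eq_true] at hc
        rcases lt_or_ge k (PySem.Str.len q.1) with hlt | hle
        · exact absurd hm (by simpa using hc (by simpa using hlt))
        · exact hle
      · exact ih k h q hq' hm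

theorem pickRec_some (text : String) (l : List (String × String)) (k : Int)
    (p : String × String) (hnd : l.Nodup) (h : pickRec text l k = some p) :
    p ∈ l ∧ PySem.Str.isIn p.1 text = true ∧ k < PySem.Str.len p.1 ∧
      (∀ q ∈ l, PySem.Str.isIn q.1 text = true → PySem.Str.len q.1 ≤ PySem.Str.len p.1 ∨ PySem.Str.len q.1 ≤ k) ∧
      (∀ q ∈ l, PySem.Str.isIn q.1 text = true → PySem.Str.len q.1 = PySem.Str.len p.1 →
        l.idxOf p ≤ l.idxOf q) := by
  induction l generalizing k with
  | nil => simp [pickRec] at h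
  | cons x t ih =>
    have hxt : x ∉ t := (List.nodup_cons.mp hnd).1
    have hndt : t.Nodup := (List.nodup_cons.mp hnd).2
    simp only [pickRec] at h
    by_cases hc : (PySem.Str.len x.1 > k && PySem.Str.isIn x.1 text) = true
    · obtain ⟨hck, hcm⟩ : (PySem.Str.len x.1 > k) = true ∧ PySem.Str.isIn x.1 text = true := by simpa using hc
      rw [if_pos hc] at h
      cases hp : pickRec text t (PySem.Str.len x.1) with
      | none =>
        rw [hp] at h; simp only [Option.getD] at h
        obtain rfl : x = p := by injection h
        have hb := pickRec_none text t _ hp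
        refine ⟨List.mem_cons_self, hcm, by simpa using hck, ?_, ?_⟩
        · intro q hq hm
          rcases List.mem_cons.mp hq with rfl | hq'
          · exact Or.inl le_rfl
          · exact Or.inl (hb q hq' hm)
        · intro q hq hm hlen
          simp [List.idxOf_cons_self]
      | some r =>
        rw [hp] at h; simp only [Option.getD] at h
        obtain rfl : p = r := by injection h with h'; exact h'.symm
        obtain ⟨hpt, hpm, hpk, hbound, hpos⟩ := ih _ hndt hp
        have hxp : x ≠ p := by
          intro hxp; exact hxt (hxp ▸ hpt)
        refine ⟨List.mem_cons_of_mem _ hpt, hpm, lt_trans (by simpa using hck) hpk, ?_, ?_⟩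
        · intro q hq hm
          rcases List.mem_cons.mp hq with rfl | hq'
          · exact Or.inl (le_of_lt hpk)
          · rcases hbound q hq' hm with hle | hle
            · exact Or.inl hle
            · exact Or.inl (le_trans hle (le_of_lt hpk))
        · intro q hq hm hlen
          rcases List.mem_cons.mp hq with rfl | hq'
          · exact absurd hlen (by omega)
          · have hxq : x ≠ q := by
              intro hxq
              have : PySem.Str.len x.1 = PySem.Str.len p.1 := by rw [hxq, hlen]
              omega
            rw [List.idxOf_cons_ne _ hxp, List.idxOf_cons_ne _ hxq]
            exact Nat.succ_le_succ (hpos q hq' hm hlen)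
    · rw [if_neg hc] at h
      obtain ⟨hpt, hpm, hpk, hbound, hpos⟩ := ih _ hndt h
      have hxne : ∀ q : String × String, q ∈ x :: t → PySem.Str.isIn q.1 text = true →
          PySem.Str.len q.1 = PySem.Str.len p.1 → x ≠ q := by
        intro q hq hm hlen hxq
        subst hxq
        simp only [Bool.and_eq_true, not_and, Bool.not_eq_true] at hc
        rcases lt_or_ge k (PySem.Str.len x.1) with hlt | hle
        · exact absurd hm (by simpa using hc (by simpa using hlt))
        · omega
      have hxp : x ≠ p := by
        intro hxp; exact hxt (hxp ▸ hpt)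
      refine ⟨List.mem_cons_of_mem _ hpt, hpm, hpk, ?_, ?_⟩
      · intro q hq hm
        rcases List.mem_cons.mp hq with rfl | hq'
        · simp only [Bool.and_eq_true, not_and, Bool.not_eq_true] at hc
          rcases lt_or_ge k (PySem.Str.len q.1) with hlt | hle
          · exact absurd hm (by simpa using hc (by simpa using hlt))
          · exact Or.inr hle
        · exact hbound q hq' hm
      · intro q hq hm hlen
        have hq' : q ∈ t := by
          rcases List.mem_cons.mp hq with rfl | hq'
          · exact absurd rfl (hxne q hq hm hlen)
          · exact hq'
        rw [List.idxOf_cons_ne _ hxp, List.idxOf_cons_ne _ (hxne q hq hm hlen)]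
        exact Nat.succ_le_succ (hpos q hq' hm hlen)

-- sorted-first-hit = scan-and-keep-longest, for a stably length-descending rearrangement L of l
theorem pickRec_eq_find (text : String) (l L : List (String × String))
    (hperm : L.Perm l) (hnd : l.Nodup)
    (hpos : ∀ p ∈ l, 0 < PySem.Str.len p.1)
    (hw : L.Pairwise (fun a b => PySem.Str.len b.1 < PySem.Str.len a.1 ∨
        (PySem.Str.len b.1 = PySem.Str.len a.1 ∧ l.idxOf a < l.idxOf b))) :
    pickRec text l 0 = L.find? (fun p => PySem.Str.isIn p.1 text) := by
  cases hfind : L.find? (fun p => PySem.Str.isIn p.1 text) with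
  | none =>
    cases hpick : pickRec text l 0 with
    | none => rfl
    | some p =>
      obtain ⟨hpl, hpm, -, -, -⟩ := pickRec_some text l 0 p hnd hpick
      have hno := List.find?_eq_none.mp hfind p (hperm.mem_iff.mpr hpl)
      exact absurd hpm hno
  | some e =>
    obtain ⟨hem, as, bs, hL, hbefore⟩ := List.find?_eq_some_iff_append.mp hfind
    have hel : e ∈ l := hperm.mem_iff.mp (hL ▸ (List.mem_append_right as List.mem_cons_self))
    cases hpick : pickRec text l 0 with
    | none =>
      have := pickRec_none text l 0 hpick e hel hem
      have := hpos e hel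
      omega
    | some p =>
      obtain ⟨hpl, hpm, -, hbound, hposn⟩ := pickRec_some text l 0 p hnd hpick
      have hple : PySem.Str.len e.1 ≤ PySem.Str.len p.1 := by
        rcases hbound e hel hem with hle | hle
        · exact hle
        · have := hpos e hel; omega
      suffices hpe : p = e by rw [hpe]
      by_contra hne
      have hpL : p ∈ L := hperm.mem_iff.mpr hpl
      have hpbs : p ∈ bs := by
        rw [hL] at hpL
        rcases List.mem_append.mp hpL with hin | hin
        · have hfalse := hbefore p hin
          rw [Bool.not_eq_true'] at hfalse
          rw [hpm] at hfalse
          cases hfalse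
        · rcases List.mem_cons.mp hin with rfl | h
          · exact absurd rfl hne
          · exact h
      have hrel := (List.pairwise_cons.mp (List.pairwise_append.mp (hL ▸ hw)).2.1).1 p hpbs
      rcases hrel with hlt | ⟨hlen, hidx⟩
      · exact absurd hlt (not_lt.mpr hple)
      · exact absurd hidx (not_lt.mpr (hposn e hel hem hlen.symm))

-- the per-field core: A's (guarded) sorted scan equals B's single pass
theorem firstAliasMatch_eq_find (text : String) (L : List (String × String)) :
    firstAliasMatch L text = (L.find? (fun p => PySem.Str.isIn p.1 text)).map Prod.snd := by
  induction L with
  | nil => rfl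
  | cons p t ih =>
    obtain ⟨a, c⟩ := p
    simp only [firstAliasMatch, List.find?]
    by_cases h : PySem.Str.isIn a text = true
    · have h' : PySem.Chars.isIn a.toList text.toList = true := by simpa using h
      simp [h']
    · simp only [Bool.not_eq_true] at h
      have h' : PySem.Chars.isIn a.toList text.toList = false := by simpa using h
      simp [h', ih]

set_option maxRecDepth 100000 in
theorem core_eq (text : String) :
    (if text = "" then none
     else firstAliasMatch (PySem.List.sorted (PySem.Dict.items (PySem.Dict.mk CATEGORY_ALIASES))
        (fun item => PySem.Str.len item.1) true) text)
    = (bestScan text CATEGORY_ALIASES ((0 : Int), none)).2 := by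
  by_cases ht : text = ""
  · subst ht
    rw [if_pos rfl]
    decide
  · rw [if_neg ht, bestScan_eq_pickRec, firstAliasMatch_eq_find,
      ← pickRec_eq_find text CATEGORY_ALIASES
        (PySem.List.sorted (PySem.Dict.items (PySem.Dict.mk CATEGORY_ALIASES))
          (fun item => PySem.Str.len item.1) true)
        (by decide) (by decide) (by decide) (by decide)]
    cases hp : pickRec text CATEGORY_ALIASES 0 <;> simp

-- definitional equation lemmas (stated once so the loop proofs never unfold the big alias literal)
theorem category_from_text_eq (v : Option String) :
    category_from_text v =
      (if PySem.Str.lower (PySem.Str.strip (v.getD "")) = "" then none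
       else firstAliasMatch (PySem.List.sorted (PySem.Dict.items (PySem.Dict.mk CATEGORY_ALIASES))
          (fun item => PySem.Str.len item.1) true)
          (PySem.Str.lower (PySem.Str.strip (v.getD "")))) := rfl

theorem loopValuesA_cons (v : Option String) (rest : List (Option String)) :
    loopValuesA (v :: rest) =
      (match category_from_text v with
       | some c => if c = "" then loopValuesA rest else some c
       | none => loopValuesA rest) := by simp only [loopValuesA]

theorem scanField_eq (d : PySem.Dict String String) (k : String) :
    scanField d k = (bestScan (PySem.Str.lower (PySem.Str.strip ((PySem.Dict.get? d k).getD "")))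
      CATEGORY_ALIASES ((0 : Int), none)).2 := rfl

theorem loopKeysB_cons (d : PySem.Dict String String) (k : String) (rest : List String) :
    loopKeysB d (k :: rest) = stepB (scanField d k) (loopKeysB d rest) := by
  simp only [loopKeysB]

-- outer loops agree, given the per-field core
theorem loop_eq (d : PySem.Dict String String) (keys : List String) :
    (match loopValuesA (keys.map (fun k => PySem.Dict.get? d k)) with
      | some c => c
      | none => normalize_category (PySem.Dict.get? d "category")) = loopKeysB d keys := by
  induction keys with
  | nil => rfl
  | cons k rest ih =>
    have hcat : category_from_text (PySem.Dict.get? d k) = scanField d k := by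
      rw [category_from_text_eq, scanField_eq]
      exact core_eq (PySem.Str.lower (PySem.Str.strip ((PySem.Dict.get? d k).getD "")))
    rw [List.map_cons, loopValuesA_cons, loopKeysB_cons, hcat]
    cases hb : scanField d k with
    | none => simp only [stepB]; exact ih
    | some c =>
      by_cases hce : c = ""
      · simp only [stepB, hce]
        exact ih
      · simp only [stepB, if_neg hce]

-- ===== VERDICT (by name: the statement is the Claim_ definition above) =====
theorem infer_candidate_category_spec : Claim_equal_infer_candidate_category := by
  intro candidate _
  have h := loop_eq (PySem.Dict.mk candidate) ["subcategory", "title", "category"]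
  simp only [List.map_cons, List.map_nil] at h
  show infer_candidate_category candidate = infer_candidate_category_alt candidate
  simp only [infer_candidate_category, infer_candidate_category_alt]
  exact h
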